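-- pv_equiv track=rewrite | github.com/Swarnim1812/Intrusion-Detection-System | model_preparation/src/feature_utils.py | normalize_feature_name
-- ===== SOURCE A (Python) =====
-- def normalize_feature_name(name: str) -> str:
--     """
--     Normalize a feature/column name so it is compatible with the model:
--     - Trim surrounding whitespace
--     - Replace spaces, dots, slashes, and hyphens with underscores
--     - Remove any remaining non-alphanumeric/underscore characters
--     - Convert to lowercase
--     """
--     if name is None:
--         return ""
--
--     normalized = (
--         str(name)
--         .strip()
--         .replace(" ", "_")
--         .replace(".", "_")
--         .replace("/", "_")
--         .replace("-", "_")
--     )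
--
--     cleaned = []
--     for ch in normalized:
--         if ch.isalnum() or ch == "_":
--             cleaned.append(ch)
--
--     return "".join(cleaned).lower()
-- ===== SOURCE B (Python) =====
-- def normalize_feature_name(name: str) -> str:
--     """Split/join algorithm: tokenize the stripped string on the separator set,
--     clean each token, then join the tokens with underscores and lowercase."""
--     if name is None:
--         return ""
--     pieces = []
--     cur = ""
--     for ch in str(name).strip():
--         if ch in " ./-":
--             pieces.append(cur)
--             cur = ""
--         else:
--             cur += ch
--     pieces.append(cur)
--     cleaned = ["".join(c for c in p if c.isalnum() or c == "_") for p in pieces]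
--     return "_".join(cleaned).lower()
-- ===== Notes on version B (the rewrite author's own statement) =====
-- stated objective: alternative
-- what changed: Replaces A's four sequential replace scans plus a flat filter loop with a split/join algorithm: tokenize the stripped string on the separator set into a list of pieces, clean each piece, and join the pieces with underscore separators before lowercasing.
import Mathlib
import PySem

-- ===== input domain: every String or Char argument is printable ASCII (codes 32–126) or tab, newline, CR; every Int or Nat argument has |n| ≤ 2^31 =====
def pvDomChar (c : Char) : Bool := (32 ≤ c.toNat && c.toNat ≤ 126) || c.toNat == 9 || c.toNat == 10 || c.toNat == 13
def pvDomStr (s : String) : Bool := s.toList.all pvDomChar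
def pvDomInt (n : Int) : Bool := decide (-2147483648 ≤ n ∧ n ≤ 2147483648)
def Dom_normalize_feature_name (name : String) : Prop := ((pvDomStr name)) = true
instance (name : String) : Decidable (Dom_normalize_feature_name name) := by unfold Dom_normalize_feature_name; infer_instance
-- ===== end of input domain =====

-- B tokenizes the stripped string on the separator set, cleans each token and joins with '_',
-- instead of A's four sequential replace scans plus a flat filter loop; return values proved equal on the domain.


-- ===== PORT A =====
-- str(name).strip() then four .replace scans, then the filter loop, then "".join(...).lower()
def normalize_feature_name (name : String) : String :=
  let normalized :=
    PySem.Chars.replace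
      (PySem.Chars.replace
        (PySem.Chars.replace
          (PySem.Chars.replace (PySem.Chars.strip name.toList) [' '] ['_'])
          ['.'] ['_'])
        ['/'] ['_'])
      ['-'] ['_']
  let cleaned := normalized.foldl
    (fun acc ch => if PySem.Chars.isalnum ch || ch = '_' then acc ++ [ch] else acc) []
  String.ofList (PySem.Chars.lower cleaned)

-- ===== PORT B =====
-- one step of Source B's tokenizer: a separator closes the current piece, anything else extends it
def nfnStep (st : List (List Char) × List Char) (ch : Char) : List (List Char) × List Char :=
  if ch = ' ' ∨ ch = '.' ∨ ch = '/' ∨ ch = '-' then (st.1 ++ [st.2], [])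
  else (st.1, st.2 ++ [ch])

-- Source B's per-piece comprehension: keep alphanumerics and underscores
def nfnClean (p : List Char) : List Char :=
  p.filter (fun c => PySem.Chars.isalnum c || c = '_')

-- tokenize, clean each piece, "_".join, lower
def normalize_feature_name_alt (name : String) : String :=
  let st := (PySem.Chars.strip name.toList).foldl nfnStep ([], [])
  let pieces := st.1 ++ [st.2]
  String.ofList (PySem.Chars.lower (PySem.Chars.join ['_'] (pieces.map nfnClean)))

-- ===== PRECONDITION & SPEC =====
def Spec_normalize_feature_name (name : String) (out : String) : Prop := out = normalize_feature_name_alt name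
instance (name : String) (out : String) : Decidable (Spec_normalize_feature_name name out) := by unfold Spec_normalize_feature_name; infer_instance

-- ===== CLAIM (what is proved, stated in full; the proofs are below) =====
def Claim_equal_normalize_feature_name : Prop := ∀ (name : String), Dom_normalize_feature_name name → Spec_normalize_feature_name name (normalize_feature_name name)

-- ===== LEMMAS AND PROOFS =====

-- replacing a single-character needle is a character-wise map
lemma replace_go_singleton (a b : Char) :
    ∀ (fuel : Nat) (l acc : List Char), l.length ≤ fuel →
      PySem.Chars.replace.go [a] [b] fuel l acc
        = acc.reverse ++ l.map (fun c => if c = a then b else c) := by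
  intro fuel
  induction fuel with
  | zero =>
    intro l acc h
    have : l = [] := List.length_eq_zero_iff.mp (Nat.le_zero.mp h)
    subst this; simp [PySem.Chars.replace.go]
  | succ n ih =>
    intro l acc h
    cases l with
    | nil => simp [PySem.Chars.replace.go]
    | cons c t =>
      have ht : t.length ≤ n := by simpa using Nat.lt_succ_iff.mp (by simpa using h)
      simp only [PySem.Chars.replace.go, List.isPrefixOf, Bool.and_true,
        List.length_singleton, List.drop_succ_cons, List.drop_zero,
        List.reverse_singleton, List.singleton_append]
      by_cases hc : c = a
      · subst hc
        rw [if_pos (by simp), ih t (b :: acc) ht]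
        simp
      · rw [if_neg (by simp [(Ne.symm hc : a ≠ c)]), ih t (c :: acc) ht]
        simp [hc]

lemma replace_singleton (s : List Char) (a b : Char) :
    PySem.Chars.replace s [a] [b] = s.map (fun c => if c = a then b else c) := by
  simpa using replace_go_singleton a b s.length s [] le_rfl

-- A's filter loop is List.filter
lemma filter_loop (l : List Char) :
    l.foldl (fun acc ch => if PySem.Chars.isalnum ch || ch = '_' then acc ++ [ch] else acc) []
      = l.filter (fun ch => PySem.Chars.isalnum ch || ch = '_') := by
  simpa using PySem.List.foldl_append_if (fun ch => PySem.Chars.isalnum ch || ch = '_') id l []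

-- appending one more piece to a nonempty join inserts one separator
lemma join_concat (sep x : List Char) :
    ∀ (L : List (List Char)), L ≠ [] →
      PySem.Chars.join sep (L ++ [x]) = PySem.Chars.join sep L ++ sep ++ x := by
  intro L
  induction L with
  | nil => intro h; exact absurd rfl h
  | cons a t ih =>
    intro _
    cases t with
    | nil => simp [PySem.Chars.join_cons_cons, PySem.Chars.join_singleton]
    | cons b u =>
      have := ih (by simp)
      simp only [List.cons_append, PySem.Chars.join_cons_cons] at *
      simp [this, List.append_assoc]

-- extending the last piece extends the join
lemma join_last_append (sep x e : List Char) :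
    ∀ (L : List (List Char)),
      PySem.Chars.join sep (L ++ [x ++ e]) = PySem.Chars.join sep (L ++ [x]) ++ e := by
  intro L
  induction L with
  | nil => simp [PySem.Chars.join_singleton]
  | cons a t ih =>
    cases t with
    | nil =>
      simp [PySem.Chars.join_cons_cons, PySem.Chars.join_singleton, List.append_assoc]
    | cons b u =>
      simp only [List.cons_append, PySem.Chars.join_cons_cons] at *
      simp [ih, List.append_assoc]

-- the heart: B's tokenizer/clean/join over s, started from any state,
-- equals the already-joined state followed by A's filtered four-fold replacement of s
lemma core (s : List Char) :
    ∀ (ps : List (List Char)) (cur : List Char),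
      PySem.Chars.join ['_'] ((((s.foldl nfnStep (ps, cur)).1 ++ [(s.foldl nfnStep (ps, cur)).2]).map nfnClean))
        = PySem.Chars.join ['_'] ((ps ++ [cur]).map nfnClean)
          ++ ((((s.map (fun c => if c = ' ' then '_' else c)).map
                (fun c => if c = '.' then '_' else c)).map
                (fun c => if c = '/' then '_' else c)).map
                (fun c => if c = '-' then '_' else c)).filter
              (fun ch => PySem.Chars.isalnum ch || ch = '_') := by
  induction s with
  | nil => intro ps cur; simp
  | cons c t ih =>
    intro ps cur
    by_cases hsep : c = ' ' ∨ c = '.' ∨ c = '/' ∨ c = '-'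
    · have hstep : nfnStep (ps, cur) c = (ps ++ [cur], []) := by simp [nfnStep, hsep]
      have hrep : (if (if (if (if c = ' ' then '_' else c) = '.' then '_'
            else (if c = ' ' then '_' else c)) = '/' then '_'
            else (if (if c = ' ' then '_' else c) = '.' then '_'
            else (if c = ' ' then '_' else c))) = '-' then '_'
            else (if (if (if c = ' ' then '_' else c) = '.' then '_'
            else (if c = ' ' then '_' else c)) = '/' then '_'
            else (if (if c = ' ' then '_' else c) = '.' then '_'
            else (if c = ' ' then '_' else c)))) = '_' := by
        rcases hsep with h | h | h | h <;> subst h <;> decide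
      simp only [List.foldl_cons, hstep, List.map_cons, List.filter_cons, hrep]
      rw [ih (ps ++ [cur]) []]
      have hM : ((ps ++ [cur]).map nfnClean) ≠ [] := by simp
      have : ((ps ++ [cur] ++ [([] : List Char)]).map nfnClean)
          = ((ps ++ [cur]).map nfnClean) ++ [[]] := by simp [nfnClean]
      rw [this, join_concat _ _ _ hM]
      simp [List.append_assoc]
    · push Not at hsep
      obtain ⟨h1, h2, h3, h4⟩ := hsep
      have hstep : nfnStep (ps, cur) c = (ps, cur ++ [c]) := by
        simp [nfnStep, h1, h2, h3, h4]
      have hrep : (if (if (if (if c = ' ' then '_' else c) = '.' then '_'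
            else (if c = ' ' then '_' else c)) = '/' then '_'
            else (if (if c = ' ' then '_' else c) = '.' then '_'
            else (if c = ' ' then '_' else c))) = '-' then '_'
            else (if (if (if c = ' ' then '_' else c) = '.' then '_'
            else (if c = ' ' then '_' else c)) = '/' then '_'
            else (if (if c = ' ' then '_' else c) = '.' then '_'
            else (if c = ' ' then '_' else c)))) = c := by
        simp [h1, h2, h3, h4]
      simp only [List.foldl_cons, hstep, List.map_cons, List.filter_cons, hrep]
      rw [ih ps (cur ++ [c])]
      have hclean : ((ps ++ [cur ++ [c]]).map nfnClean)
          = (ps.map nfnClean) ++ [nfnClean cur ++ nfnClean [c]] := by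
        simp [nfnClean]
      have hsplit : ((ps ++ [cur]).map nfnClean) = (ps.map nfnClean) ++ [nfnClean cur] := by
        simp
      rw [hclean, join_last_append, ← hsplit]
      by_cases hp : (PySem.Chars.isalnum c || c = '_') = true
      · simp [nfnClean, hp, List.append_assoc]
      · simp [nfnClean, hp]

-- ===== VERDICT (by name: the statement is the Claim_ definition above) =====
theorem normalize_feature_name_spec : Claim_equal_normalize_feature_name := by
  intro name _
  show _ = _
  unfold normalize_feature_name normalize_feature_name_alt
  simp only [replace_singleton, filter_loop]
  rw [core]
  simp [nfnClean]
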